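-- pv_equiv track=rewrite | github.com/SimpleMaking/internship | lesson_1/task_4.py | bananas
-- ===== SOURCE A (Python) =====
-- import itertools as it
--
-- def compress_improve(data, selectors):
--     list_of_values = list()
--     for d, s in zip(data, selectors):
--         if s:
--             list_of_values.append(d)
--         else:
--             list_of_values.append("-")
--     return list_of_values
--
-- def bananas(s) -> set:
--     result = set()
--     count_of_opt = list(it.product([1, 0], repeat = len(s)))
--     count_of_itters = 0
--     str_ = ''
--     for value in count_of_opt:
--         value_ = ''.join(compress_improve(s, value))
--
--         for i in value_:
--             if i != "-":
--                 str_ += i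
--         if str_ == "banana":
--             result.add(value_)
--             count_of_itters += 1
--
--         str_ = ''
--
--     return result
-- ===== SOURCE B (Python) =====
-- def bananas(s) -> set:
--     # backtracking: match positions of s against the letters of "banana",
--     # emitting a masked string only for real matches
--     target = "banana"
--     out = []
--
--     def go(i, j, acc):
--         if i == len(s):
--             if j == len(target):
--                 out.append(acc)
--             return
--         if j < len(target) and s[i] == target[j]:
--             go(i + 1, j + 1, acc + s[i])
--         go(i + 1, j, acc + "-")
--
--     go(0, 0, "")
--     return set(out)
-- ===== Notes on version B (the rewrite author's own statement) =====
-- stated objective: faster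
-- what changed: Replaced the exhaustive enumeration of all 2^n keep/drop masks (building and filtering every masked string) by a pruned backtracking search that matches positions of s against the letters of 'banana' and emits a masked string only when a full match is completed.
import Mathlib
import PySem

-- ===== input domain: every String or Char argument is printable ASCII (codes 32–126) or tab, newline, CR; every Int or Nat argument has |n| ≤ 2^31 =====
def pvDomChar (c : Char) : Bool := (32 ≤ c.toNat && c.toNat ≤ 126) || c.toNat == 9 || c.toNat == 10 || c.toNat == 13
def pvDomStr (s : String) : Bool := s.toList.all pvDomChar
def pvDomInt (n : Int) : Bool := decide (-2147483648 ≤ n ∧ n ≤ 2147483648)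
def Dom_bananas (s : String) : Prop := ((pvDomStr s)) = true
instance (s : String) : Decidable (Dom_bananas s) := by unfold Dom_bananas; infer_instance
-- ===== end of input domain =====

-- B replaces A's enumeration of all 2^n keep/drop masks by a pruned backtracking search that
-- matches positions of s against the letters of "banana" and emits a mask only on a full match.

-- ===== PORT A =====
def compressImprove (data : List Char) (selectors : List Int) : List Char :=
  (List.zip data selectors).foldl
    (fun listOfValues ds => if ds.2 ≠ 0 then listOfValues ++ [ds.1] else listOfValues ++ ['-']) []

def prod01 : Nat → List (List Int)
  | 0 => [[]]
  | n + 1 => ([1, 0] : List Int).flatMap fun x => (prod01 n).map (fun v => x :: v)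

def bananas (s : String) : List String :=
  (prod01 s.toList.length).foldl
    (fun (result : PySem.Set String) value =>
      let value_ : String := String.ofList (compressImprove s.toList value)
      let str_ : String := String.ofList
        (value_.toList.foldl (fun acc i => if i ≠ '-' then acc ++ [i] else acc) [])
      if str_ = "banana" then result.add value_ else result)
    PySem.Set.empty

-- ===== PORT B =====
def bananasGo : List Char → List Char → List Char → List (List Char)
  | [], t, acc => if t = [] then [acc] else []
  | c :: rest, t, acc =>
      (match t with
       | h :: t' => if c = h then bananasGo rest t' (acc ++ [c]) else []
       | [] => []) ++ bananasGo rest t (acc ++ ['-'])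

def bananas_alt (s : String) : List String :=
  PySem.Set.ofList ((bananasGo s.toList "banana".toList []).map String.ofList)

-- ===== PRECONDITION & SPEC =====
def Spec_bananas (s : String) (out : List String) : Prop := out = bananas_alt s
instance (s : String) (out : List String) : Decidable (Spec_bananas s out) := by unfold Spec_bananas; infer_instance

-- ===== CLAIM (what is proved, stated in full; the proofs are below) =====
def Claim_equal_bananas : Prop := ∀ (s : String), Dom_bananas s → Spec_bananas s (bananas s)

-- ===== LEMMAS AND PROOFS =====

-- the masked string of one selector tuple, as a plain recursion
def maskL : List Char → List Int → List Char
  | c :: cs, v :: vs => (if v ≠ 0 then c else '-') :: maskL cs vs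
  | _, _ => []

-- the matching masked strings, in A's enumeration order (before set-deduplication)
def matchesM (cs : List Char) (t : List Char) : List (List Char) :=
  ((prod01 cs.length).map (maskL cs)).filter
    (fun w => decide (w.filter (fun i => decide (i ≠ '-')) = t))

theorem ofList_inj_iff (a b : List Char) : String.ofList a = String.ofList b ↔ a = b := by
  constructor
  · intro h
    have := congrArg String.toList h
    simpa using this
  · intro h; rw [h]

theorem string_ofList_injective : Function.Injective String.ofList := by
  intro a b h; exact (ofList_inj_iff a b).mp h

theorem ofList_eq_banana_iff (l : List Char) :
    (String.ofList l = "banana") ↔ l = ("banana" : String).toList := by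
  constructor
  · intro h
    have := congrArg String.toList h
    simpa using this
  · intro h
    rw [h, String.ofList_toList]

theorem foldl_filter_dash (l : List Char) : ∀ acc : List Char,
    l.foldl (fun acc i => if i ≠ '-' then acc ++ [i] else acc) acc
      = acc ++ l.filter (fun i => decide (i ≠ '-')) := by
  induction l with
  | nil => intro acc; simp
  | cons hd tl ih =>
      intro acc
      rw [List.foldl_cons, List.filter_cons]
      by_cases h : hd = '-'
      · rw [if_neg (by simp [h]), if_neg (by simp [h])]
        exact ih acc
      · rw [if_pos (by simp [h]), if_pos (by simp [h]), ih (acc ++ [hd])]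
        simp

theorem compress_eq_mask (data : List Char) : ∀ (sel : List Int) (acc : List Char),
    (List.zip data sel).foldl
        (fun listOfValues ds => if ds.2 ≠ 0 then listOfValues ++ [ds.1] else listOfValues ++ ['-']) acc
      = acc ++ maskL data sel := by
  induction data with
  | nil => intro sel acc; simp [maskL]
  | cons c cs ih =>
      intro sel acc
      cases sel with
      | nil => simp [maskL]
      | cons v vs =>
          rw [List.zip_cons_cons, List.foldl_cons]
          by_cases h : v = 0
          · rw [if_neg (by simp [h]), ih vs (acc ++ ['-'])]
            simp [maskL, h]
          · rw [if_pos (by simp [h]), ih vs (acc ++ [c])]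
            simp [maskL, h]

theorem foldl_add_if {β : Type} (p : β → Prop) [DecidablePred p] (f : β → String) :
    ∀ (L : List β) (init : PySem.Set String),
    L.foldl (fun r v => if p v then r.add (f v) else r) init
      = PySem.Set.update init ((L.filter (fun v => decide (p v))).map f) := by
  intro L
  induction L with
  | nil => intro init; simp [PySem.Set.update_nil]
  | cons hd tl ih =>
      intro init
      rw [List.foldl_cons, List.filter_cons]
      by_cases h : p hd
      · rw [if_pos h, if_pos (by simp [h]), List.map_cons, ih, PySem.Set.update_cons]
      · rw [if_neg h, if_neg (by simp [h])]
        exact ih init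

theorem goB_acc (cs : List Char) : ∀ (t acc : List Char),
    bananasGo cs t acc = (bananasGo cs t []).map (fun w => acc ++ w) := by
  induction cs with
  | nil =>
      intro t acc
      by_cases h : t = [] <;> simp [bananasGo, h]
  | cons c rest ih =>
      intro t acc
      cases t with
      | nil =>
          simp only [bananasGo]
          rw [ih [] (acc ++ ['-']), ih [] (([] : List Char) ++ ['-'])]
          simp [Function.comp_def]
      | cons h t' =>
          by_cases hc : c = h
          · simp only [bananasGo, if_pos hc]
            rw [ih t' (acc ++ [c]), ih (h :: t') (acc ++ ['-']),
                ih t' (([] : List Char) ++ [c]), ih (h :: t') (([] : List Char) ++ ['-'])]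
            simp [Function.comp_def, List.append_assoc]
          · simp only [bananasGo, if_neg hc]
            rw [ih (h :: t') (acc ++ ['-']), ih (h :: t') (([] : List Char) ++ ['-'])]
            simp [Function.comp_def]

theorem ofList_dup {α : Type} [BEq α] [LawfulBEq α] (M : List α) :
    PySem.Set.ofList (M ++ M) = PySem.Set.ofList M := by
  rw [PySem.Set.ofList_append, PySem.Set.update_eq_append_filter]
  have : (PySem.Set.ofList M).filter (fun y => !(PySem.Set.ofList M).contains y) = [] := by
    rw [List.filter_eq_nil_iff]
    intro a ha
    rw [PySem.Set.mem_ofList] at ha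
    simp [PySem.Set.mem_ofList, ha]
  rw [this, List.append_nil]

theorem ofList_disjoint_append {α : Type} [BEq α] [LawfulBEq α] (A B : List α)
    (h : ∀ a ∈ A, ∀ b ∈ B, a ≠ b) :
    PySem.Set.ofList (A ++ B) = PySem.Set.ofList A ++ PySem.Set.ofList B := by
  rw [PySem.Set.ofList_append, PySem.Set.update_eq_append_filter]
  congr 1
  rw [List.filter_eq_self]
  intro b hb
  rw [PySem.Set.mem_ofList] at hb
  have hnA : b ∉ A := fun hbA => (h b hbA b hb) rfl
  simp [PySem.Set.mem_ofList, hnA]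

theorem cons_injective (c : Char) : Function.Injective (fun w : List Char => c :: w) :=
  fun a b h => by simpa using h

theorem ofList_map_inj {α β : Type} [BEq α] [LawfulBEq α] [BEq β] [LawfulBEq β]
    (f : α → β) (hf : Function.Injective f) (l : List α) :
    PySem.Set.ofList (l.map f) = (PySem.Set.ofList l).map f := by
  induction l using List.reverseRecOn with
  | nil => simp [PySem.Set.ofList_nil]
  | append_singleton xs x ih =>
      rw [List.map_append, List.map_singleton, PySem.Set.ofList_append_singleton,
          PySem.Set.ofList_append_singleton, ih, PySem.Set.add_eq_ite, PySem.Set.add_eq_ite]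
      by_cases h : x ∈ PySem.Set.ofList xs
      · rw [if_pos h, if_pos (List.mem_map_of_mem h)]
      · rw [if_neg h, if_neg (fun hm => h (by
          obtain ⟨y, hy, hxy⟩ := List.mem_map.mp hm
          exact hf hxy ▸ hy))]
        simp

-- heads of the two halves differ, so the maps are element-disjoint
theorem cons_maps_disjoint {c d : Char} (hcd : c ≠ d) (X Y : List (List Char)) :
    ∀ a ∈ X.map (fun w => c :: w), ∀ b ∈ Y.map (fun w => d :: w), a ≠ b := by
  intro a ha b hb
  obtain ⟨x, _, hx⟩ := List.mem_map.mp ha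
  obtain ⟨y, _, hy⟩ := List.mem_map.mp hb
  rw [← hx, ← hy]
  intro hcon
  simp only [List.cons.injEq] at hcon
  exact hcd hcon.1

theorem prod01_succ (n : Nat) :
    prod01 (n + 1) = (prod01 n).map (fun v => (1 : Int) :: v) ++ (prod01 n).map (fun v => (0 : Int) :: v) := by
  simp [prod01, List.flatMap]

theorem main_lemma (cs : List Char) : ∀ (t : List Char), '-' ∉ t →
    PySem.Set.ofList (matchesM cs t) = bananasGo cs t [] := by
  induction cs with
  | nil =>
      intro t ht
      by_cases h : t = []
      · subst h; simp [matchesM, prod01, maskL, bananasGo, PySem.Set.ofList]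
      · simp [matchesM, prod01, maskL, bananasGo, h, Ne.symm h, PySem.Set.ofList]
  | cons c cs' ih =>
      intro t ht
      have key : matchesM (c :: cs') t
          = (((prod01 cs'.length).map (maskL cs')).filter
              (fun w => decide ((c :: w).filter (fun i => decide (i ≠ '-')) = t))).map (fun w => c :: w)
            ++ (matchesM cs' t).map (fun w => '-' :: w) := by
        unfold matchesM
        rw [show (c :: cs').length = cs'.length + 1 from rfl, prod01_succ, List.map_append,
            List.filter_append]
        have h1 : (maskL (c :: cs')) ∘ (fun v => (1 : Int) :: v)
            = (fun w => c :: w) ∘ (maskL cs') := by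
          funext v; simp [maskL]
        have h0 : (maskL (c :: cs')) ∘ (fun v => (0 : Int) :: v)
            = (fun w => '-' :: w) ∘ (maskL cs') := by
          funext v; simp [maskL]
        congr 1
        · rw [List.map_map, h1, ← List.map_map, List.filter_map]
          rfl
        · rw [List.map_map, h0, ← List.map_map, List.filter_map]
          rfl
      by_cases hc : c = '-'
      · -- the character is A's own placeholder: it can never be part of the target
        subst hc
        have hsame : (fun w => decide (('-' :: w).filter (fun i => decide (i ≠ '-')) = t))
            = (fun w : List Char => decide (w.filter (fun i => decide (i ≠ '-')) = t)) := by
          funext w; simp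
        rw [key]
        rw [hsame]
        rw [show (((prod01 cs'.length).map (maskL cs')).filter
              (fun w => decide (w.filter (fun i => decide (i ≠ '-')) = t))) = matchesM cs' t from rfl]
        rw [← List.map_append, ofList_map_inj _ (cons_injective _), ofList_dup, ih t ht]
        cases t with
        | nil =>
            simp only [bananasGo]
            rw [goB_acc cs' [] (([] : List Char) ++ ['-'])]
            simp
        | cons h t' =>
            have hh : h ≠ '-' := fun he => ht (he ▸ List.mem_cons_self ..)
            simp only [bananasGo]
            rw [if_neg (fun he : '-' = h => hh he.symm)]
            rw [goB_acc cs' (h :: t') (([] : List Char) ++ ['-'])]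
            simp
      · -- ordinary character
        cases t with
        | nil =>
            have hfalse : ∀ w : List Char,
                decide ((c :: w).filter (fun i => decide (i ≠ '-')) = ([] : List Char)) = false := by
              intro w; simp [hc]
            rw [key]
            rw [List.filter_congr (fun w _ => hfalse w), List.filter_false, List.map_nil,
                List.nil_append]
            rw [ofList_map_inj _ (cons_injective _), ih [] ht]
            simp only [bananasGo]
            rw [goB_acc cs' [] (([] : List Char) ++ ['-'])]
            simp
        | cons h t' =>
            have ht' : '-' ∉ t' := fun hm => ht (List.mem_cons_of_mem _ hm)
            have hh : h ≠ '-' := fun he => ht (he ▸ List.mem_cons_self ..)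
            by_cases hch : c = h
            · subst hch
              have hcond : ∀ w : List Char,
                  decide ((c :: w).filter (fun i => decide (i ≠ '-')) = (c :: t'))
                    = decide (w.filter (fun i => decide (i ≠ '-')) = t') := by
                intro w; simp [hc]
              rw [key, List.filter_congr (fun w _ => hcond w)]
              rw [show (((prod01 cs'.length).map (maskL cs')).filter
                    (fun w => decide (w.filter (fun i => decide (i ≠ '-')) = t'))) = matchesM cs' t' from rfl]
              rw [ofList_disjoint_append _ _ (cons_maps_disjoint hc _ _),
                  ofList_map_inj _ (cons_injective _),
                  ofList_map_inj _ (cons_injective _),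
                  ih t' ht', ih (c :: t') ht]
              simp only [bananasGo]
              rw [goB_acc cs' t' (([] : List Char) ++ [c]),
                  goB_acc cs' (c :: t') (([] : List Char) ++ ['-'])]
              simp
            · have hfalse : ∀ w : List Char,
                  decide ((c :: w).filter (fun i => decide (i ≠ '-')) = (h :: t')) = false := by
                intro w; simp [hc, hch]
              rw [key, List.filter_congr (fun w _ => hfalse w), List.filter_false, List.map_nil,
                  List.nil_append]
              rw [ofList_map_inj _ (cons_injective _), ih (h :: t') ht]
              simp only [bananasGo, if_neg hch]
              rw [goB_acc cs' (h :: t') (([] : List Char) ++ ['-'])]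
              simp

theorem banana_toList : ("banana" : String).toList = ['b', 'a', 'n', 'a', 'n', 'a'] := by decide

theorem bananas_eq (s : String) :
    bananas s = PySem.Set.ofList ((matchesM s.toList ("banana" : String).toList).map String.ofList) := by
  unfold bananas
  have hbody : (fun (result : PySem.Set String) (value : List Int) =>
      let value_ : String := String.ofList (compressImprove s.toList value)
      let str_ : String := String.ofList
        (value_.toList.foldl (fun acc i => if i ≠ '-' then acc ++ [i] else acc) [])
      if str_ = "banana" then result.add value_ else result)
      = (fun (result : PySem.Set String) (value : List Int) =>
          if String.ofList ((maskL s.toList value).filter (fun i => decide (i ≠ '-'))) = "banana"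
          then result.add (String.ofList (maskL s.toList value)) else result) := by
    funext result value
    show (if String.ofList ((String.ofList (compressImprove s.toList value)).toList.foldl
            (fun acc i => if i ≠ '-' then acc ++ [i] else acc) []) = "banana"
          then result.add (String.ofList (compressImprove s.toList value)) else result) = _
    rw [show compressImprove s.toList value
          = (List.zip s.toList value).foldl
              (fun listOfValues ds => if ds.2 ≠ 0 then listOfValues ++ [ds.1] else listOfValues ++ ['-']) []
        from rfl,
        compress_eq_mask, List.nil_append, String.toList_ofList, foldl_filter_dash, List.nil_append]
  rw [hbody, foldl_add_if (fun value => String.ofList ((maskL s.toList value).filter (fun i => decide (i ≠ '-'))) = "banana")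
        (fun value => String.ofList (maskL s.toList value))]
  rw [show PySem.Set.update PySem.Set.empty
        (((prod01 s.toList.length).filter
            (fun v => decide (String.ofList ((maskL s.toList v).filter (fun i => decide (i ≠ '-'))) = "banana"))).map
          (fun v => String.ofList (maskL s.toList v)))
      = PySem.Set.ofList
        (((prod01 s.toList.length).filter
            (fun v => decide (String.ofList ((maskL s.toList v).filter (fun i => decide (i ≠ '-'))) = "banana"))).map
          (fun v => String.ofList (maskL s.toList v)))
    from PySem.Set.update_nil_left _]
  congr 1
  unfold matchesM
  rw [List.filter_map, List.map_map]
  congr 1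
  apply List.filter_congr
  intro v _
  simp only [Function.comp_apply]
  rw [decide_eq_decide]
  exact ofList_eq_banana_iff _

-- ===== VERDICT (by name: the statement is the Claim_ definition above) =====
theorem bananas_spec : Claim_equal_bananas := by
  intro s _
  unfold Spec_bananas
  have hban : '-' ∉ ("banana" : String).toList := by rw [banana_toList]; decide
  have hgo : (bananasGo s.toList ("banana" : String).toList []).Nodup := by
    rw [← main_lemma s.toList _ hban]
    exact PySem.Set.nodup_ofList _
  rw [bananas_eq s, bananas_alt,
      ofList_map_inj String.ofList string_ofList_injective,
      main_lemma s.toList _ hban,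
      PySem.Set.ofList_eq_self_of_nodup _ (List.Nodup.map string_ofList_injective hgo)]
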